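-- pv_equiv track=rewrite | github.com/christopherhorns42-cloud/maker-plates-tool | generator/plate_generator.py | parse_text_lines
-- ===== SOURCE A (Python) =====
-- def parse_text_lines(text):
--     """Split personalization text into lines, handling both \n and / as line breaks."""
--     lines = []
--     for raw_line in text.replace('\\n', '\n').split('\n'):
--         for sub in raw_line.split('/'):
--             stripped = sub.strip()
--             if stripped:
--                 lines.append(stripped)
--     return lines if lines else [""]
-- ===== SOURCE B (Python) =====
-- def parse_text_lines(text):
--     """Single left-to-right character scan: flush the current chunk at each
--     '\n' or '/', keeping stripped non-empty chunks; no nested splits."""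
--     normalized = text.replace('\\n', '\n')
--     lines = []
--     cur = []
--     for ch in normalized:
--         if ch == '\n' or ch == '/':
--             s = ''.join(cur).strip()
--             if s:
--                 lines.append(s)
--             cur = []
--         else:
--             cur.append(ch)
--     s = ''.join(cur).strip()
--     if s:
--         lines.append(s)
--     return lines if lines else [""]
-- ===== Notes on version B (the rewrite author's own statement) =====
-- stated objective: alternative
-- what changed: Replaces A's nested split('\n')/split('/') loops with a single left-to-right character scan that flushes the current chunk at each separator.
import Mathlib
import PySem

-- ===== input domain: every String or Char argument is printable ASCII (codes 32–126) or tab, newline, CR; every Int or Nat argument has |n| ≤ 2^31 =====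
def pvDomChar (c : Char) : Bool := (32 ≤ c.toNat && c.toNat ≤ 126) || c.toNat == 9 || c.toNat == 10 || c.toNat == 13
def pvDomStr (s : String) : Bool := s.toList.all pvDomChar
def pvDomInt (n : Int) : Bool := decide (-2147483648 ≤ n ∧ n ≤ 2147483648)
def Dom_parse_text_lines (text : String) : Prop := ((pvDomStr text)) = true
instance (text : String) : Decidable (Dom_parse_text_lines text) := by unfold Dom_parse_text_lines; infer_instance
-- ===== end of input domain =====

-- B replaces A's nested split('\n')/split('/') loops with a single character scan; alternative decomposition, same cost.


-- ===== PORT A =====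
-- literal transliteration: outer split on '\n', inner split on '/', strip, append non-empty
def parse_text_lines (text : String) : List String :=
  let lines :=
    (PySem.Chars.splitOn (PySem.Str.replace text "\\n" "\n").toList ['\n']).foldl
      (fun lines raw_line =>
        (PySem.Chars.splitOn raw_line ['/']).foldl
          (fun lines sub =>
            let stripped := PySem.Chars.strip sub
            if stripped ≠ [] then lines ++ [String.ofList stripped] else lines)
          lines)
      []
  if lines = [] then [""] else lines

-- ===== PORT B =====
-- B-side helper: flush the current chunk (strip; keep if non-empty)
def pvFlush (acc : List String) (cur : List Char) : List String :=
  let s := PySem.Chars.strip cur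
  if s ≠ [] then acc ++ [String.ofList s] else acc

-- B-side scanner: one pass over the characters
def pvScan : List Char → List Char → List String → List String
  | [], cur, acc => pvFlush acc cur
  | c :: cs, cur, acc =>
      if c == '\n' || c == '/' then pvScan cs [] (pvFlush acc cur)
      else pvScan cs (cur ++ [c]) acc

def parse_text_lines_alt (text : String) : List String :=
  let lines := pvScan (PySem.Str.replace text "\\n" "\n").toList [] []
  if lines = [] then [""] else lines

-- ===== PRECONDITION & SPEC =====
def Spec_parse_text_lines (text : String) (out : List String) : Prop := out = parse_text_lines_alt text
instance (text : String) (out : List String) : Decidable (Spec_parse_text_lines text out) := by unfold Spec_parse_text_lines; infer_instance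

-- ===== CLAIM (what is proved, stated in full; the proofs are below) =====
def Claim_equal_parse_text_lines : Prop := ∀ (text : String), Dom_parse_text_lines text → Spec_parse_text_lines text (parse_text_lines text)

-- ===== LEMMAS AND PROOFS =====

-- structural split on a character predicate (proof-side mediator)
def pvSplitCh (p : Char → Bool) : List Char → List (List Char)
  | [] => [[]]
  | c :: cs => if p c then [] :: pvSplitCh p cs else (pvSplitCh p cs).modifyHead (c :: ·)

-- keep the stripped non-empty pieces
def pvCollect (ps : List (List Char)) : List String :=
  ps.filterMap (fun cs =>
    let s := PySem.Chars.strip cs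
    if s ≠ [] then some (String.ofList s) else none)

lemma pvSplitCh_ne_nil (p : Char → Bool) (l : List Char) : pvSplitCh p l ≠ [] := by
  induction l with
  | nil => simp [pvSplitCh]
  | cons c cs ih =>
    simp only [pvSplitCh]
    split
    · simp
    · cases h : pvSplitCh p cs with
      | nil => exact absurd h ih
      | cons a t => simp

-- PySem.Chars.splitOn with a single-character separator is pvSplitCh
lemma pvGo_eq (a : Char) (fuel : Nat) :
    ∀ (l cur : List Char) (accl : List (List Char)), l.length ≤ fuel →
      PySem.Chars.splitOn.go [a] fuel l cur accl =
        accl.reverse ++ (pvSplitCh (· == a) l).modifyHead (cur.reverse ++ ·) := by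
  induction fuel with
  | zero =>
    intro l cur accl hl
    have hnil : l = [] := by cases l with | nil => rfl | cons x xs => exact absurd hl (by simp)
    subst hnil
    simp [PySem.Chars.splitOn.go, pvSplitCh]
  | succ n ih =>
    intro l cur accl hl
    cases l with
    | nil => simp [PySem.Chars.splitOn.go, pvSplitCh]
    | cons c rest =>
      simp only [List.length_cons] at hl
      by_cases hc : a = c
      · subst hc
        have hpre : List.isPrefixOf [a] (a :: rest) = true := by
          simp [List.isPrefixOf]
        rw [PySem.Chars.splitOn.go]
        simp only [hpre, if_pos, List.length_cons, List.length_nil,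
          List.drop_succ_cons, List.drop_zero]
        rw [ih rest [] (cur.reverse :: accl) (by omega)]
        simp [pvSplitCh, List.modifyHead]
        cases h : pvSplitCh (· == a) rest with
        | nil => exact absurd h (pvSplitCh_ne_nil _ _)
        | cons p ps => simp
      · have hpre : List.isPrefixOf [a] (c :: rest) = false := by
          simp [List.isPrefixOf, hc]
        rw [PySem.Chars.splitOn.go]
        simp only [hpre, Bool.false_eq_true, if_false]
        rw [ih rest (c :: cur) accl (by omega)]
        have hpc : ((· == a) c) = false := by simp; intro h; exact hc h.symm
        simp only [pvSplitCh, hpc, Bool.false_eq_true, if_false]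
        cases h : pvSplitCh (· == a) rest with
        | nil => exact absurd h (pvSplitCh_ne_nil _ _)
        | cons p ps => simp

lemma pvSplitOn_single (a : Char) (l : List Char) :
    PySem.Chars.splitOn l [a] = pvSplitCh (· == a) l := by
  have h := pvGo_eq a (l.length + 1) l [] [] (by omega)
  have h2 : (pvSplitCh (· == a) l).modifyHead (fun x => x) = pvSplitCh (· == a) l := by
    cases pvSplitCh (· == a) l <;> simp
  rw [PySem.Chars.splitOn]
  simp only [List.reverse_nil, List.nil_append] at h
  rw [h, h2]

-- splitting twice = splitting on the disjunction
lemma pvSplitCh_flatMap (p q : Char → Bool) (l : List Char) :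
    (pvSplitCh p l).flatMap (pvSplitCh q) = pvSplitCh (fun c => p c || q c) l := by
  induction l with
  | nil => simp [pvSplitCh]
  | cons c cs ih =>
    simp only [pvSplitCh]
    by_cases hp : p c = true
    · simp only [hp, Bool.true_or, if_pos, List.flatMap_cons]
      rw [← ih]
      simp [pvSplitCh]
    · cases h : pvSplitCh p cs with
      | nil => exact absurd h (pvSplitCh_ne_nil _ _)
      | cons hd tl =>
        have ih' : pvSplitCh q hd ++ tl.flatMap (pvSplitCh q) =
            pvSplitCh (fun c => p c || q c) cs := by
          rw [← ih, h, List.flatMap_cons]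
        simp only [hp, Bool.false_eq_true, if_false, Bool.false_or, List.modifyHead_cons,
          List.flatMap_cons]
        by_cases hq : q c = true
        · simp only [hq, if_pos, pvSplitCh]
          rw [← ih']
          simp
        · simp only [hq, Bool.false_eq_true, if_false, pvSplitCh]
          rw [← ih']
          cases hS : pvSplitCh q hd with
          | nil => exact absurd hS (pvSplitCh_ne_nil _ _)
          | cons x xs => simp

-- pvCollect homomorphisms
lemma pvCollect_cons (cs : List Char) (ps : List (List Char)) :
    pvCollect (cs :: ps) =
      (if PySem.Chars.strip cs ≠ [] then [String.ofList (PySem.Chars.strip cs)] else []) ++ pvCollect ps := by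
  simp only [pvCollect, List.filterMap_cons]; split <;> simp_all

-- A's inner loop collects the pieces
lemma pvInner (ps : List (List Char)) (acc : List String) :
    ps.foldl (fun lines sub =>
      let stripped := PySem.Chars.strip sub
      if stripped ≠ [] then lines ++ [String.ofList stripped] else lines) acc
    = acc ++ pvCollect ps := by
  induction ps generalizing acc with
  | nil => simp [pvCollect]
  | cons c t ih => simp only [List.foldl_cons, ih, pvCollect_cons]; split <;> simp

-- B's scanner invariant
lemma pvScan_eq (l : List Char) :
    ∀ (cur : List Char) (acc : List String),
      pvScan l cur acc = acc ++ pvCollect ((pvSplitCh (fun c => c == '\n' || c == '/') l).modifyHead (cur ++ ·)) := by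
  induction l with
  | nil =>
    intro cur acc
    simp only [pvScan, pvSplitCh, List.modifyHead_cons, List.append_nil, pvCollect,
      List.filterMap_cons, List.filterMap_nil, pvFlush]
    split <;> simp_all
  | cons c cs ih =>
    intro cur acc
    simp only [pvScan]
    by_cases hc : (c == '\n' || c == '/') = true
    · rw [if_pos hc, ih [] (pvFlush acc cur)]
      simp only [pvSplitCh, hc, if_pos, List.modifyHead_cons, pvCollect_cons, pvFlush]
      have hid : (pvSplitCh (fun c => c == '\n' || c == '/') cs).modifyHead (fun x => [] ++ x)
          = pvSplitCh (fun c => c == '\n' || c == '/') cs := by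
        cases pvSplitCh (fun c => c == '\n' || c == '/') cs <;> simp
      rw [hid]
      split <;> simp_all
    · rw [if_neg hc, ih (cur ++ [c]) acc]
      have hcf : (c == '\n' || c == '/') = false := by
        simpa using hc
      simp only [pvSplitCh, hcf, Bool.false_eq_true, if_false]
      cases hS : pvSplitCh (fun c => c == '\n' || c == '/') cs with
      | nil => exact absurd hS (pvSplitCh_ne_nil _ _)
      | cons hd tl => simp

lemma pvCollect_append (ps qs : List (List Char)) :
    pvCollect (ps ++ qs) = pvCollect ps ++ pvCollect qs := by
  simp [pvCollect]

-- A's outer loop collects the flattened inner splits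
lemma pvOuter (ps : List (List Char)) (acc : List String) :
    ps.foldl (fun lines raw_line =>
      (pvSplitCh (· == '/') raw_line).foldl
        (fun lines sub =>
          let stripped := PySem.Chars.strip sub
          if stripped ≠ [] then lines ++ [String.ofList stripped] else lines)
        lines) acc
    = acc ++ pvCollect (ps.flatMap (pvSplitCh (· == '/'))) := by
  induction ps generalizing acc with
  | nil => simp [pvCollect]
  | cons hd tl ih =>
    rw [List.foldl_cons, pvInner, ih, List.flatMap_cons, pvCollect_append, List.append_assoc]

-- both programs compute pvCollect of the one-predicate split
lemma pvMain (text : String) : parse_text_lines text = parse_text_lines_alt text := by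
  unfold parse_text_lines parse_text_lines_alt
  have hA :
      (PySem.Chars.splitOn (PySem.Str.replace text "\\n" "\n").toList ['\n']).foldl
        (fun lines raw_line =>
          (PySem.Chars.splitOn raw_line ['/']).foldl
            (fun lines sub =>
              let stripped := PySem.Chars.strip sub
              if stripped ≠ [] then lines ++ [String.ofList stripped] else lines)
            lines) []
      = pvCollect (pvSplitCh (fun c => c == '\n' || c == '/')
          (PySem.Str.replace text "\\n" "\n").toList) := by
    rw [pvSplitOn_single]
    have hfun : (fun (lines : List String) (raw_line : List Char) =>
        (PySem.Chars.splitOn raw_line ['/']).foldl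
          (fun lines sub =>
            let stripped := PySem.Chars.strip sub
            if stripped ≠ [] then lines ++ [String.ofList stripped] else lines)
          lines)
        = (fun (lines : List String) (raw_line : List Char) =>
        (pvSplitCh (· == '/') raw_line).foldl
          (fun lines sub =>
            let stripped := PySem.Chars.strip sub
            if stripped ≠ [] then lines ++ [String.ofList stripped] else lines)
          lines) := by
      funext lines raw_line
      rw [pvSplitOn_single]
    rw [hfun, pvOuter, pvSplitCh_flatMap, List.nil_append]
  have hB :
      pvScan (PySem.Str.replace text "\\n" "\n").toList [] []
      = pvCollect (pvSplitCh (fun c => c == '\n' || c == '/')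
          (PySem.Str.replace text "\\n" "\n").toList) := by
    rw [pvScan_eq]
    have hid : (pvSplitCh (fun c => c == '\n' || c == '/')
          (PySem.Str.replace text "\\n" "\n").toList).modifyHead (fun x => [] ++ x)
        = pvSplitCh (fun c => c == '\n' || c == '/')
          (PySem.Str.replace text "\\n" "\n").toList := by
      cases pvSplitCh (fun c => c == '\n' || c == '/')
          (PySem.Str.replace text "\\n" "\n").toList <;> simp
    rw [hid, List.nil_append]
  rw [hA, hB]

-- ===== VERDICT (by name: the statement is the Claim_ definition above) =====
theorem parse_text_lines_spec : Claim_equal_parse_text_lines := by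
  intro text _
  unfold Spec_parse_text_lines
  exact pvMain text
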